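-- pv_equiv track=rewrite | github.com/seominji58/saegim-backend | app/utils/validators.py | extract_minio_object_key
-- ===== SOURCE A (Python) =====
-- def extract_minio_object_key(url: str) -> str:
--     """
--     MinIO URL에서 객체 키 추출하는 공통 함수
--
--     Args:
--         url: MinIO 객체 URL
--
--     Returns:
--         추출된 객체 키 (경로)
--
--     Examples:
--         extract_minio_object_key("http://localhost:9000/saegim-images/images/2023/12/01/uuid.jpg")
--         # Returns: "images/2023/12/01/uuid.jpg"
--     """
--     try:
--         # URL에서 버킷 이름 이후의 경로를 객체 키로 추출
--         parts = url.split("/")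
--         bucket_index = -1
--         for i, part in enumerate(parts):
--             if "saegim-images" in part or part == "saegim-images":
--                 bucket_index = i
--                 break
--
--         if bucket_index != -1 and bucket_index + 1 < len(parts):
--             return "/".join(parts[bucket_index + 1:])
--
--         return ""
--     except Exception:
--         return ""
-- ===== SOURCE B (Python) =====
-- def extract_minio_object_key(url: str) -> str:
--     try:
--         _before, sep, after = url.partition("saegim-images")
--         if sep == "":
--             return ""
--         return after.partition("/")[2]
--     except Exception:
--         return ""
-- ===== Notes on version B (the rewrite author's own statement) =====
-- stated objective: simpler
-- what changed: Replaces the split-into-segments + enumerate scan + join with two first-occurrence partitions (on the bucket-name literal, then on the next path separator); no segment list is ever built.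
import Mathlib
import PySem

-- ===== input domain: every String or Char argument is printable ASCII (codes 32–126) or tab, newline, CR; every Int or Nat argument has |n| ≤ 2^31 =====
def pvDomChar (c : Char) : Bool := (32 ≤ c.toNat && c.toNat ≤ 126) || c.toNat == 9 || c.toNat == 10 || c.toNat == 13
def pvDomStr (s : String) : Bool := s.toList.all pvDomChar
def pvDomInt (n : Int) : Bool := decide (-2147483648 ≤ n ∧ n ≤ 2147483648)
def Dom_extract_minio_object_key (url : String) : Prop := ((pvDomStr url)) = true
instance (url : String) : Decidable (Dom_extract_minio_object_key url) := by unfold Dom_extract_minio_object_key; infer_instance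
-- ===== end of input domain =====

-- B replaces A's split/enumerate scan over path segments by two partitions (first occurrence of the
-- bucket-name literal, then the next path separator); objective: simpler. A is total on strings.

-- the bucket-name literal, shared by both ports
def pvPat : List Char := "saegim-images".toList

-- ===== PORT A =====
-- the 'for i, part in enumerate(parts): if "saegim-images" in part or part == "saegim-images": bucket_index = i; break' loop
def pvFindBucketIdx : List (List Char) → Nat → Option Nat
  | [], _ => none
  | part :: ps, i =>
      if PySem.Chars.isIn pvPat part || part == pvPat then some i else pvFindBucketIdx ps (i + 1)

def pvACore (cs : List Char) : String :=
  let parts := PySem.Chars.splitOn cs ['/']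
  match pvFindBucketIdx parts 0 with
  | some i => if i + 1 < parts.length then String.ofList (PySem.Chars.join ['/'] (parts.drop (i + 1))) else ""
  | none => ""

def extract_minio_object_key (url : String) : String := pvACore url.toList

-- ===== PORT B =====
-- str.partition ported by hand via Chars.find (exact: partition splits at the FIRST occurrence,
-- empty middle component iff the separator is absent, i.e. find = -1)
def pvBCore (cs : List Char) : String :=
  let f := PySem.Chars.find cs pvPat
  if f = -1 then ""
  else
    let after := cs.drop (f.toNat + pvPat.length)
    let g := PySem.Chars.find after ['/']
    if g = -1 then "" else String.ofList (after.drop (g.toNat + 1))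

def extract_minio_object_key_alt (url : String) : String := pvBCore url.toList

-- ===== PRECONDITION & SPEC =====
def Spec_extract_minio_object_key (url : String) (out : String) : Prop := out = extract_minio_object_key_alt url
instance (url : String) (out : String) : Decidable (Spec_extract_minio_object_key url out) := by unfold Spec_extract_minio_object_key; infer_instance

-- ===== CLAIM (what is proved, stated in full; the proofs are below) =====
def Claim_equal_extract_minio_object_key : Prop := ∀ (url : String), Dom_extract_minio_object_key url → Spec_extract_minio_object_key url (extract_minio_object_key url)

-- ===== LEMMAS AND PROOFS =====

lemma go_nil (fuel : Nat) (cur : List Char) (acc : List (List Char)) :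
  PySem.Chars.splitOn.go ['/'] fuel [] cur acc = acc.reverse ++ [cur.reverse] := by
  cases fuel <;> rw [PySem.Chars.splitOn.go] <;> simp
lemma go_cons (fuel : Nat) (c : Char) (rest cur : List Char) (acc : List (List Char)) :
  PySem.Chars.splitOn.go ['/'] (fuel+1) (c :: rest) cur acc =
    (if c = '/' then PySem.Chars.splitOn.go ['/'] fuel rest [] (cur.reverse :: acc)
     else PySem.Chars.splitOn.go ['/'] fuel rest (c :: cur) acc) := by
  rw [PySem.Chars.splitOn.go]
  by_cases h : c = '/' <;> simp [List.isPrefixOf, h] <;> simp [eq_comm] <;> try simp_all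
lemma go_acc (l : List Char) : ∀ (fuel : Nat) (cur : List Char) (acc : List (List Char)),
    l.length ≤ fuel →
    PySem.Chars.splitOn.go ['/'] fuel l cur acc
      = acc.reverse ++ PySem.Chars.splitOn.go ['/'] l.length l cur [] := by
  induction l with
  | nil => intro fuel cur acc _; simp [go_nil]
  | cons c rest ih =>
    intro fuel cur acc h
    obtain ⟨f, rfl⟩ : ∃ f, fuel = f + 1 := ⟨fuel - 1, by simp at h; omega⟩
    have hf : rest.length ≤ f := by simp at h; omega
    rw [show (c :: rest).length = rest.length + 1 from rfl, go_cons, go_cons]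
    by_cases hc : c = '/'
    · rw [if_pos hc]
      rw [if_pos hc]
      rw [ih f [] (cur.reverse :: acc) hf]
      rw [ih rest.length [] [cur.reverse] le_rfl]
      simp
    · simp only [if_neg hc]
      rw [ih f (c :: cur) acc hf, ih rest.length (c :: cur) [] le_rfl]

lemma go_nosep (l : List Char) : ∀ (fuel : Nat) (cur : List Char) (acc : List (List Char)),
    l.length ≤ fuel → '/' ∉ l →
    PySem.Chars.splitOn.go ['/'] fuel l cur acc = acc.reverse ++ [cur.reverse ++ l] := by
  induction l with
  | nil => intro fuel cur acc _ _; simp [go_nil]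
  | cons c rest ih =>
    intro fuel cur acc h hm
    obtain ⟨f, rfl⟩ : ∃ f, fuel = f + 1 := ⟨fuel - 1, by simp at h; omega⟩
    have hc : c ≠ '/' := fun e => hm (e ▸ List.mem_cons_self)
    rw [go_cons, if_neg hc, ih f (c :: cur) acc (by simp at h; omega) (fun m => hm (List.mem_cons_of_mem _ m))]
    simp

lemma splitOn_nosep (cs : List Char) (h : '/' ∉ cs) : PySem.Chars.splitOn cs ['/'] = [cs] := by
  unfold PySem.Chars.splitOn
  rw [go_nosep cs (cs.length + 1) [] [] (by omega) h]
  simp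

lemma go_peel (p : List Char) : ∀ (rest : List Char) (fuel : Nat) (cur : List Char) (acc : List (List Char)),
    '/' ∉ p → (p ++ '/' :: rest).length ≤ fuel →
    PySem.Chars.splitOn.go ['/'] fuel (p ++ '/' :: rest) cur acc
      = PySem.Chars.splitOn.go ['/'] (fuel - (p.length + 1)) rest [] ((cur.reverse ++ p) :: acc) := by
  induction p with
  | nil =>
    intro rest fuel cur acc _ h
    obtain ⟨f, rfl⟩ : ∃ f, fuel = f + 1 := ⟨fuel - 1, by simp at h; omega⟩
    rw [List.nil_append, go_cons]
    simp
  | cons a p' ih =>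
    intro rest fuel cur acc hp h
    obtain ⟨f, rfl⟩ : ∃ f, fuel = f + 1 := ⟨fuel - 1, by simp at h; omega⟩
    have ha : a ≠ '/' := fun e => hp (e ▸ List.mem_cons_self)
    rw [List.cons_append, go_cons, if_neg ha,
      ih rest f (a :: cur) acc (fun m => hp (List.mem_cons_of_mem _ m)) (by simp at h ⊢; omega)]
    have : f + 1 - ((a :: p').length + 1) = f - (p'.length + 1) := by simp
    rw [this]
    simp

lemma splitOn_split (p rest : List Char) (hp : '/' ∉ p) :
    PySem.Chars.splitOn (p ++ '/' :: rest) ['/'] = p :: PySem.Chars.splitOn rest ['/'] := by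
  unfold PySem.Chars.splitOn
  rw [go_peel p rest _ [] [] hp (by omega)]
  have h1 : (p ++ '/' :: rest).length + 1 - (p.length + 1) = rest.length + 1 := by simp
  rw [h1]
  simp only [List.reverse_nil, List.nil_append]
  rw [go_acc rest (rest.length + 1) [] [p] (by omega),
      go_acc rest (rest.length + 1) [] [] (by omega)]
  simp

lemma exists_split (cs : List Char) (h : '/' ∈ cs) :
    ∃ p rest, cs = p ++ '/' :: rest ∧ '/' ∉ p := by
  induction cs with
  | nil => cases h
  | cons c t ih =>
    by_cases hc : c = '/'
    · exact ⟨[], t, by simp [hc], by simp⟩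
    · obtain ⟨p, rest, rfl, hp⟩ := ih (by cases h with
        | head => exact absurd rfl hc
        | tail _ m => exact m)
      exact ⟨c :: p, rest, rfl, by simp [hp, Ne.symm hc]⟩

lemma splitOn_ne_nil (cs : List Char) : PySem.Chars.splitOn cs ['/'] ≠ [] := by
  by_cases h : '/' ∈ cs
  · obtain ⟨p, rest, rfl, hp⟩ := exists_split cs h
    rw [splitOn_split p rest hp]; simp
  · rw [splitOn_nosep cs h]; simp

lemma join_splitOn : ∀ (n : Nat) (cs : List Char), cs.length ≤ n →
    PySem.Chars.join ['/'] (PySem.Chars.splitOn cs ['/']) = cs := by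
  intro n
  induction n with
  | zero =>
    intro cs h
    have : cs = [] := List.length_eq_zero_iff.mp (by omega)
    subst this
    rw [splitOn_nosep [] (by simp), PySem.Chars.join_singleton]
  | succ m ih =>
    intro cs h
    by_cases hm : '/' ∈ cs
    · obtain ⟨p, rest, rfl, hp⟩ := exists_split cs hm
      rw [splitOn_split p rest hp]
      obtain ⟨q, qs, hq⟩ : ∃ q qs, PySem.Chars.splitOn rest ['/'] = q :: qs :=
        List.exists_cons_of_ne_nil (splitOn_ne_nil rest)
      rw [hq, PySem.Chars.join_cons_cons, ← hq, ih rest (by simp at h; omega)]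
      simp
    · rw [splitOn_nosep cs hm, PySem.Chars.join_singleton]

lemma prefix_of_append_left {l u v : List Char} (h : l <+: u ++ v) (hl : l.length ≤ u.length) :
    l <+: u := by
  rw [List.prefix_iff_eq_take] at h ⊢
  rw [h, List.take_append_of_le_length hl]
  simp [List.length_take, Nat.min_eq_left hl]

lemma infix_of_prefix_drop {sub cs : List Char} (k : Nat) (h : sub <+: cs.drop k) : sub <:+: cs := by
  obtain ⟨t, ht⟩ := h
  exact ⟨cs.take k, t, by rw [List.append_assoc, ht, List.take_append_drop]⟩

lemma find_eq_of (cs sub : List Char) (k : Nat) (h1 : sub <+: cs.drop k)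
    (h2 : ∀ i < k, ¬ sub <+: cs.drop i) : PySem.Chars.find cs sub = (k : Int) := by
  have hin : sub <:+: cs := infix_of_prefix_drop k h1
  have hne : PySem.Chars.find cs sub ≠ -1 := (PySem.Chars.find_ne_neg_one_iff cs sub).mpr hin
  have hnn : 0 ≤ PySem.Chars.find cs sub := (PySem.Chars.find_nonneg_iff cs sub).mpr hin
  obtain ⟨hpre, hmin⟩ := PySem.Chars.find_spec hnn
  rcases Nat.lt_trichotomy (PySem.Chars.find cs sub).toNat k with hlt | heq | hgt
  · exact absurd hpre (h2 _ hlt)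
  · omega
  · exact absurd h1 (hmin k hgt)

lemma pvPat_len : pvPat.length = 13 := by decide
lemma slash_not_mem_pvPat : '/' ∉ pvPat := by decide

lemma occ_split (p rest : List Char) (hp : '/' ∉ p) (i : Nat)
    (h : pvPat <+: (p ++ '/' :: rest).drop i) :
    (i + pvPat.length ≤ p.length ∧ pvPat <+: p.drop i) ∨
      (p.length + 1 ≤ i ∧ pvPat <+: rest.drop (i - (p.length + 1))) := by
  by_cases hi : i ≤ p.length
  · rw [List.drop_append_of_le_length hi] at h
    by_cases hfit : i + pvPat.length ≤ p.length
    · left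
      refine ⟨hfit, prefix_of_append_left h ?_⟩
      rw [pvPat_len] at hfit ⊢
      simp
      omega
    · exfalso
      obtain ⟨t, ht⟩ := h
      have hk : (p.drop i).length < pvPat.length := by
        rw [pvPat_len] at *
        simp
        omega
      have h1 : (p.drop i ++ '/' :: rest)[(p.drop i).length]? = some '/' := by
        rw [List.getElem?_append_right le_rfl]
        simp
      rw [← ht, List.getElem?_append_left hk] at h1
      exact slash_not_mem_pvPat (List.mem_of_getElem? h1)
  · right
    obtain ⟨j, rfl⟩ : ∃ j, i = p.length + 1 + j := ⟨i - (p.length + 1), by omega⟩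
    refine ⟨by omega, ?_⟩
    have hdec : (p ++ '/' :: rest).drop (p.length + 1 + j) = rest.drop j := by
      rw [show p.length + 1 + j = (p ++ ['/']).length + j by simp,
          show p ++ '/' :: rest = (p ++ ['/']) ++ rest by simp, List.drop_length_add_append]
    rw [hdec] at h
    have hj : p.length + 1 + j - (p.length + 1) = j := by omega
    rw [hj]
    exact h

lemma not_infix_split (p rest : List Char) (hp : '/' ∉ p) (h1 : ¬ pvPat <:+: p)
    (h2 : ¬ pvPat <:+: rest) : ¬ pvPat <:+: (p ++ '/' :: rest) := by
  intro h
  have := (PySem.Chars.exists_prefix_drop_iff_isIn pvPat (p ++ '/' :: rest)).symm.mp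
    ((PySem.Chars.isIn_iff_infix _ _).mpr h)
  obtain ⟨j, hj⟩ := this
  rcases occ_split p rest hp j hj with ⟨_, hpre⟩ | ⟨_, hpre⟩
  · exact h1 (infix_of_prefix_drop _ hpre)
  · exact h2 (infix_of_prefix_drop _ hpre)

lemma cond_iff (q : List Char) :
    (PySem.Chars.isIn pvPat q || q == pvPat) = true ↔ pvPat <:+: q := by
  constructor
  · intro h
    rcases Bool.or_eq_true_iff.mp h with h' | h'
    · exact (PySem.Chars.isIn_iff_infix _ _).mp h'
    · exact (beq_iff_eq.mp h') ▸ List.infix_refl _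
  · intro h
    exact Bool.or_eq_true_iff.mpr (Or.inl ((PySem.Chars.isIn_iff_infix _ _).mpr h))

lemma pvFindBucketIdx_shift (l : List (List Char)) : ∀ (i : Nat),
    pvFindBucketIdx l (i + 1) = (pvFindBucketIdx l i).map (· + 1) := by
  induction l with
  | nil => intro i; rfl
  | cons q t ih =>
    intro i
    by_cases h : (PySem.Chars.isIn pvPat q || q == pvPat) = true
    · simp [pvFindBucketIdx, h]
    · simp only [pvFindBucketIdx, if_neg h]
      exact ih (i + 1)

lemma drop_split (p rest : List Char) (j : Nat) :
    (p ++ '/' :: rest).drop (p.length + 1 + j) = rest.drop j := by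
  rw [show p.length + 1 + j = (p ++ ['/']).length + j by simp,
      show p ++ '/' :: rest = (p ++ ['/']) ++ rest by simp, List.drop_length_add_append]

lemma singleton_prefix_iff (l : List Char) (c : Char) : [c] <+: l ↔ ∃ t, l = c :: t := by
  constructor
  · rintro ⟨t, ht⟩; exact ⟨t, ht.symm⟩
  · rintro ⟨t, rfl⟩; exact ⟨t, rfl⟩

lemma core_eq_nosep (cs : List Char) (h : '/' ∉ cs) : pvACore cs = pvBCore cs := by
  have hA : pvACore cs = "" := by
    unfold pvACore
    rw [splitOn_nosep cs h]
    by_cases hc : (PySem.Chars.isIn pvPat cs || cs == pvPat) = true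
    · simp [pvFindBucketIdx, hc]
    · simp [pvFindBucketIdx, hc]
  have hB : pvBCore cs = "" := by
    unfold pvBCore
    by_cases hf : PySem.Chars.find cs pvPat = -1
    · simp [hf]
    · have hg : PySem.Chars.find (cs.drop ((PySem.Chars.find cs pvPat).toNat + pvPat.length)) ['/'] = -1 := by
        rw [PySem.Chars.find_eq_neg_one_iff]
        intro hinf
        have : '/' ∈ cs.drop ((PySem.Chars.find cs pvPat).toNat + pvPat.length) := by
          have := hinf.subset
          simp at this
          exact this
        exact h (List.mem_of_mem_drop this)
      simp [hf, hg]
  rw [hA, hB]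

lemma core_A_skip (p rest : List Char) (hp : '/' ∉ p) (hb : ¬ pvPat <:+: p) :
    pvACore (p ++ '/' :: rest) = pvACore rest := by
  have hc : (PySem.Chars.isIn pvPat p || p == pvPat) = false := by
    rw [← Bool.not_eq_true]
    intro h
    exact hb ((cond_iff p).mp h)
  unfold pvACore
  rw [splitOn_split p rest hp]
  simp only [pvFindBucketIdx, hc, Bool.false_eq_true, if_false, pvFindBucketIdx_shift]
  cases hidx : pvFindBucketIdx (PySem.Chars.splitOn rest ['/']) 0 with
  | none => simp
  | some i =>
    simp only [Option.map_some]
    rw [List.length_cons, List.drop_succ_cons]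
    by_cases hlt : i + 1 < (PySem.Chars.splitOn rest ['/']).length
    · rw [if_pos (by omega), if_pos hlt]
    · rw [if_neg (by omega), if_neg hlt]

lemma core_B_skip (p rest : List Char) (hp : '/' ∉ p) (hb : ¬ pvPat <:+: p) :
    pvBCore (p ++ '/' :: rest) = pvBCore rest := by
  by_cases hr : PySem.Chars.find rest pvPat = -1
  · have hcs : PySem.Chars.find (p ++ '/' :: rest) pvPat = -1 := by
      rw [PySem.Chars.find_eq_neg_one_iff]
      exact not_infix_split p rest hp hb ((PySem.Chars.find_eq_neg_one_iff rest pvPat).mp hr)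
    unfold pvBCore
    rw [if_pos hcs, if_pos hr]
  · have hnn : 0 ≤ PySem.Chars.find rest pvPat := by
      have := PySem.Chars.neg_one_le_find rest pvPat
      omega
    obtain ⟨hpre, hmin⟩ := PySem.Chars.find_spec hnn
    set k := (PySem.Chars.find rest pvPat).toNat with hk
    have hcs : PySem.Chars.find (p ++ '/' :: rest) pvPat = ((p.length + 1 + k : Nat) : Int) := by
      apply find_eq_of
      · rw [drop_split]
        exact hpre
      · intro i hi hcon
        rcases occ_split p rest hp i hcon with ⟨_, hpp⟩ | ⟨hge, hpp⟩
        · exact hb (infix_of_prefix_drop _ hpp)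
        · exact hmin (i - (p.length + 1)) (by omega) hpp
    have h1 : ((((p.length + 1 + k : Nat)) : Int)).toNat + pvPat.length = p.length + 1 + (k + pvPat.length) := by
      simp
      omega
    have hrhs : pvBCore rest =
        (if PySem.Chars.find (rest.drop (k + pvPat.length)) ['/'] = -1 then ""
         else String.ofList ((rest.drop (k + pvPat.length)).drop
           ((PySem.Chars.find (rest.drop (k + pvPat.length)) ['/']).toNat + 1))) := by
      unfold pvBCore
      rw [if_neg hr]
    have hlhs : pvBCore (p ++ '/' :: rest) =
        (if PySem.Chars.find (rest.drop (k + pvPat.length)) ['/'] = -1 then ""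
         else String.ofList ((rest.drop (k + pvPat.length)).drop
           ((PySem.Chars.find (rest.drop (k + pvPat.length)) ['/']).toNat + 1))) := by
      unfold pvBCore
      rw [hcs, if_neg (by omega), h1, drop_split]
    rw [hlhs, hrhs]

lemma core_A_found (p rest : List Char) (hp : '/' ∉ p) (hb : pvPat <:+: p) :
    pvACore (p ++ '/' :: rest) = String.ofList rest := by
  have hc : (PySem.Chars.isIn pvPat p || p == pvPat) = true := (cond_iff p).mpr hb
  unfold pvACore
  rw [splitOn_split p rest hp]
  simp only [pvFindBucketIdx, hc, if_true]
  have hne := splitOn_ne_nil rest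
  rw [if_pos (by
    rw [List.length_cons]
    have := List.length_pos_iff.mpr hne
    omega)]
  rw [List.drop_succ_cons, List.drop_zero, join_splitOn rest.length rest le_rfl]

lemma core_B_found (p rest : List Char) (hp : '/' ∉ p) (hb : pvPat <:+: p) :
    pvBCore (p ++ '/' :: rest) = String.ofList rest := by
  have hpnn : 0 ≤ PySem.Chars.find p pvPat := (PySem.Chars.find_nonneg_iff p pvPat).mpr hb
  obtain ⟨hpre, hmin⟩ := PySem.Chars.find_spec hpnn
  set j := (PySem.Chars.find p pvPat).toNat with hj
  have hjlen : j + pvPat.length ≤ p.length := by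
    have h1 := hpre.length_le
    have h2 : (p.drop j).length = p.length - j := List.length_drop
    by_cases hjp : j ≤ p.length
    · omega
    · rw [List.drop_eq_nil_of_le (by omega)] at hpre
      have := hpre.length_le
      have := pvPat_len
      simp at this ⊢
      omega
  have hcs : PySem.Chars.find (p ++ '/' :: rest) pvPat = ((j : Nat) : Int) := by
    apply find_eq_of
    · rw [List.drop_append_of_le_length (by omega)]
      exact hpre.trans (List.prefix_append _ _)
    · intro i hi hcon
      rcases occ_split p rest hp i hcon with ⟨_, hpp⟩ | ⟨hge, _⟩
      · exact hmin i hi hpp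
      · omega
  unfold pvBCore
  rw [hcs, if_neg (by omega)]
  have h1 : (((j : Nat)) : Int).toNat + pvPat.length = j + pvPat.length := by simp
  rw [h1, List.drop_append_of_le_length hjlen]
  set q := p.drop (j + pvPat.length) with hq
  have hqs : '/' ∉ q := fun m => hp (List.mem_of_mem_drop m)
  have hg : PySem.Chars.find (q ++ '/' :: rest) ['/'] = ((q.length : Nat) : Int) := by
    apply find_eq_of
    · rw [List.drop_left]
      exact ⟨rest, rfl⟩
    · intro i hi hcon
      rw [List.drop_append_of_le_length (by omega), singleton_prefix_iff] at hcon
      obtain ⟨t, ht⟩ := hcon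
      obtain ⟨c, u, hcu⟩ : ∃ c u, q.drop i = c :: u :=
        List.exists_cons_of_ne_nil (by
          intro hnil
          have : (q.drop i).length = 0 := by rw [hnil]; rfl
          rw [List.length_drop] at this
          omega)
      rw [hcu] at ht
      simp at ht
      have hcq : c ∈ q := List.mem_of_mem_drop (by rw [hcu]; exact List.mem_cons_self)
      exact hqs (ht.1 ▸ hcq)
  change (if PySem.Chars.find (q ++ '/' :: rest) ['/'] = -1 then ""
    else String.ofList (List.drop ((PySem.Chars.find (q ++ '/' :: rest) ['/']).toNat + 1) (q ++ '/' :: rest))) = String.ofList rest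
  rw [hg, if_neg (by omega)]
  have h2 : ((q.length : Nat) : Int).toNat + 1 = q.length + 1 := by simp
  rw [h2, show q ++ '/' :: rest = (q ++ ['/']) ++ rest by simp,
     show q.length + 1 = (q ++ ['/']).length by simp]
  rw [List.drop_left]

lemma core_eq : ∀ (n : Nat) (cs : List Char), cs.length ≤ n → pvACore cs = pvBCore cs := by
  intro n
  induction n with
  | zero =>
    intro cs h
    have : cs = [] := List.length_eq_zero_iff.mp (by omega)
    subst this
    exact core_eq_nosep [] (by simp)
  | succ m ih =>
    intro cs h
    by_cases hm : '/' ∈ cs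
    · obtain ⟨p, rest, rfl, hp⟩ := exists_split cs hm
      have hrest : rest.length ≤ m := by simp at h; omega
      by_cases hb : pvPat <:+: p
      · rw [core_A_found p rest hp hb, core_B_found p rest hp hb]
      · rw [core_A_skip p rest hp hb, core_B_skip p rest hp hb, ih rest hrest]
    · exact core_eq_nosep cs hm

-- ===== VERDICT (by name: the statement is the Claim_ definition above) =====
theorem extract_minio_object_key_spec : Claim_equal_extract_minio_object_key := by
  intro url _
  unfold Spec_extract_minio_object_key extract_minio_object_key extract_minio_object_key_alt
  exact core_eq url.toList.length url.toList le_rfl
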